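-- pv_equiv track=rewrite | github.com/Kodeing/Non-Parker-Square | square.py | square_validator
-- ===== SOURCE A (Python) =====
-- def square_validator(square):
--     temp = [x**2 for x in square]
--     s1 = temp[0] + temp[1] + temp[2]
--     s2 = temp[3] + temp[4] + temp[5]
--     s3 = temp[6] + temp[7] + temp[8]
--     s4 = temp[0] + temp[3] + temp[6]
--     s5 = temp[1] + temp[4] + temp[7]
--     s6 = temp[2] + temp[5] + temp[8]
--     s7 = temp[0] + temp[4] + temp[8]
--     s8 = temp[2] + temp[4] + temp[6]
--     if s1 != s2: return False
--     if s2 != s3: return False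
--     if s3 != s4: return False
--     if s4 != s5: return False
--     if s5 != s6: return False
--     if s6 != s7: return False
--     if s7 != s8: return False
--     return True
-- ===== SOURCE B (Python) =====
-- def square_validator(square):
--     t = [x * x for x in square]
--     c = t[4]
--     return (t[0] + t[8] == 2 * c and t[2] + t[6] == 2 * c and
--             t[1] + t[7] == 2 * c and t[3] + t[5] == 2 * c and
--             t[0] + t[1] + t[2] == 3 * c and t[0] + t[3] + t[6] == 3 * c)
-- ===== Notes on version B (the rewrite author's own statement) =====
-- stated objective: alternative
-- what changed: Replaced the computation and chained comparison of the eight line sums by the algebraic center characterization of a 3x3 magic square: the four opposite pairs each sum to twice the center and the first row and first column each sum to three times it.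
import Mathlib
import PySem

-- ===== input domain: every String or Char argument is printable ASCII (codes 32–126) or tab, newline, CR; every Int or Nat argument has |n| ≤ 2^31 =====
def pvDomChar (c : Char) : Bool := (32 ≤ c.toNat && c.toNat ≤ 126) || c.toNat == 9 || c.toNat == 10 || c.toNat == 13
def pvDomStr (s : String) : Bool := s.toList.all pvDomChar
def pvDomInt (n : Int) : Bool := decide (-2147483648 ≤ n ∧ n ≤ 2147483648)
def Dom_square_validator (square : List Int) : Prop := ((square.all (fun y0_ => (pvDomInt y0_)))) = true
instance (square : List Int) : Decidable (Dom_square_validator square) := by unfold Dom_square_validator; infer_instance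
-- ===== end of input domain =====

-- B replaces A's eight line sums and chained comparisons with the algebraic center
-- characterization of a 3x3 magic square (objective: alternative algorithm).

-- ===== PORT A =====
def square_validator (square : List Int) : Bool :=
  let temp := square.map (fun x => x ^ 2)
  let s1 := PySem.List.pyGetD temp 0 0 + PySem.List.pyGetD temp 1 0 + PySem.List.pyGetD temp 2 0
  let s2 := PySem.List.pyGetD temp 3 0 + PySem.List.pyGetD temp 4 0 + PySem.List.pyGetD temp 5 0
  let s3 := PySem.List.pyGetD temp 6 0 + PySem.List.pyGetD temp 7 0 + PySem.List.pyGetD temp 8 0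
  let s4 := PySem.List.pyGetD temp 0 0 + PySem.List.pyGetD temp 3 0 + PySem.List.pyGetD temp 6 0
  let s5 := PySem.List.pyGetD temp 1 0 + PySem.List.pyGetD temp 4 0 + PySem.List.pyGetD temp 7 0
  let s6 := PySem.List.pyGetD temp 2 0 + PySem.List.pyGetD temp 5 0 + PySem.List.pyGetD temp 8 0
  let s7 := PySem.List.pyGetD temp 0 0 + PySem.List.pyGetD temp 4 0 + PySem.List.pyGetD temp 8 0
  let s8 := PySem.List.pyGetD temp 2 0 + PySem.List.pyGetD temp 4 0 + PySem.List.pyGetD temp 6 0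
  if s1 ≠ s2 then false
  else if s2 ≠ s3 then false
  else if s3 ≠ s4 then false
  else if s4 ≠ s5 then false
  else if s5 ≠ s6 then false
  else if s6 ≠ s7 then false
  else if s7 ≠ s8 then false
  else true

-- ===== PORT B =====
def square_validator_alt (square : List Int) : Bool :=
  let t := square.map (fun x => x * x)
  let c := PySem.List.pyGetD t 4 0
  (PySem.List.pyGetD t 0 0 + PySem.List.pyGetD t 8 0 == 2 * c) &&
  (PySem.List.pyGetD t 2 0 + PySem.List.pyGetD t 6 0 == 2 * c) &&
  (PySem.List.pyGetD t 1 0 + PySem.List.pyGetD t 7 0 == 2 * c) &&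
  (PySem.List.pyGetD t 3 0 + PySem.List.pyGetD t 5 0 == 2 * c) &&
  (PySem.List.pyGetD t 0 0 + PySem.List.pyGetD t 1 0 + PySem.List.pyGetD t 2 0 == 3 * c) &&
  (PySem.List.pyGetD t 0 0 + PySem.List.pyGetD t 3 0 + PySem.List.pyGetD t 6 0 == 3 * c)

-- ===== PRECONDITION & SPEC =====
-- A (and B alike) raises IndexError on lists with fewer than 9 elements.
def Pre_square_validator (square : List Int) : Prop := 9 ≤ square.length
instance (square : List Int) : Decidable (Pre_square_validator square) := by
  unfold Pre_square_validator; infer_instance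
def pvWitness_square_validator : List Int := [1, 2, 3, 4, 5, 6, 7, 8, 9]

def Spec_square_validator (square : List Int) (out : Bool) : Prop := out = square_validator_alt square
instance (square : List Int) (out : Bool) : Decidable (Spec_square_validator square out) := by unfold Spec_square_validator; infer_instance

-- ===== CLAIM (what is proved, stated in full; the proofs are below) =====
def Claim_equal_square_validator : Prop := ∀ (square : List Int), Dom_square_validator square → Pre_square_validator square → Spec_square_validator square (square_validator square)

-- ===== LEMMAS AND PROOFS =====

-- ===== VERDICT (by name: the statement is the Claim_ definition above) =====
theorem square_validator_spec : Claim_equal_square_validator := by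
  intro square _ hpre
  unfold Spec_square_validator
  match square, hpre with
  | a :: b :: c :: d :: e :: f :: g :: h :: i :: rest, _ =>
    simp only [square_validator, square_validator_alt, pow_two]
    simp only [pysem, List.map, List.getD_cons_zero, List.getD_cons_succ]
    generalize a * a = t0
    generalize b * b = t1
    generalize c * c = t2
    generalize d * d = t3
    generalize e * e = t4
    generalize f * f = t5
    generalize g * g = t6
    generalize h * h = t7
    generalize i * i = t8
    split_ifs <;> symm <;>
      simp only [Bool.and_eq_true, Bool.and_eq_false_iff, beq_iff_eq,
        beq_eq_false_iff_ne, ne_eq] <;>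
      omega
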